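-- pv_equiv track=rewrite | github.com/HoonDongKang/Algorithm | 백준/Gold/2504. 괄호의 값/괄호의 값.py | solve
-- ===== SOURCE A (Python) =====
-- def solve(braces: str) -> int:
--     stack = []
--     result = 0
--     calculate_number = 1
--     prev_brace = ''
--
--     for brace in braces:
--
--         if brace == '(':
--             stack.append(brace)
--             calculate_number *= 2
--
--         elif brace == '[':
--             stack.append(brace)
--             calculate_number *= 3
--
--         elif brace == ')':
--             if not stack or stack[-1] != '(':
--                 return 0
--
--             if prev_brace == '(':
--                 result += calculate_number
--
--             stack.pop()
--             calculate_number //= 2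
--
--         elif brace == ']':
--             if not stack or stack[-1] != '[':
--                 return 0
--
--             if prev_brace == '[':
--                 result += calculate_number
--
--             stack.pop()
--             calculate_number //= 3
--
--         prev_brace = brace
--
--     return result if not stack else 0
-- ===== SOURCE B (Python) =====
-- def solve(braces: str) -> int:
--     # Value stack: holds open-bracket markers (str) and computed integer values.
--     stack = []
--     prev = ''
--     for ch in braces:
--         if ch == '(' or ch == '[':
--             stack.append(ch)
--         elif ch == ')' or ch == ']':
--             open_b, base = ('(', 2) if ch == ')' else ('[', 3)
--             s = 0
--             while stack and isinstance(stack[-1], int):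
--                 s += stack.pop()
--             if not stack or stack[-1] != open_b:
--                 return 0
--             stack.pop()
--             stack.append(base if prev == open_b else base * s)
--         prev = ch
--     if any(isinstance(e, str) for e in stack):
--         return 0
--     return sum(stack)
-- ===== Notes on version B (the rewrite author's own statement) =====
-- stated objective: alternative
-- what changed: Replaces A's global multiplier/result accumulator (with floor-divisions on every close) by a value stack: open brackets are pushed as markers, each closed pair collapses the values above its marker into one partial value (base for a leaf, base*sum otherwise), and the answer is the sum left on the stack.
import Mathlib
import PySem

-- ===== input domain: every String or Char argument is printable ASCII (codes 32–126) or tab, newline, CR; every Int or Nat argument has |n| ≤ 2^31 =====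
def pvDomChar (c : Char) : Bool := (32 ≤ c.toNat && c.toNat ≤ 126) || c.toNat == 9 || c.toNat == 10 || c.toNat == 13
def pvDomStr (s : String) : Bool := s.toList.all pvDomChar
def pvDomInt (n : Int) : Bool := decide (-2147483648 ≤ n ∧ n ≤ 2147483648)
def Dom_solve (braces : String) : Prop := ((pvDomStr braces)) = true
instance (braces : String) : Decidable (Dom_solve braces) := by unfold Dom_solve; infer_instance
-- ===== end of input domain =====

-- B replaces A's global multiplier/result pair with a stack of partial values (alternative
-- decomposition, same cost); equivalence of the return values is proved below.

-- ===== PORT A =====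
-- A's stack (top = list head); prev_brace '' ↔ none, a one-char string ↔ some c.
def solveLoop : List Char → List Char → Int → Int → Option Char → Int
  | [], stack, result, _, _ => if stack = [] then result else 0
  | b :: rest, stack, result, mult, prev =>
    if b = '(' then
      solveLoop rest (b :: stack) result (mult * 2) (some b)
    else if b = '[' then
      solveLoop rest (b :: stack) result (mult * 3) (some b)
    else if b = ')' then
      match stack with
      | [] => 0
      | t :: s =>
        if t ≠ '(' then 0
        else solveLoop rest s (if prev = some '(' then result + mult else result)
              (PySem.Int.floordiv mult 2) (some b)
    else if b = ']' then
      match stack with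
      | [] => 0
      | t :: s =>
        if t ≠ '[' then 0
        else solveLoop rest s (if prev = some '[' then result + mult else result)
              (PySem.Int.floordiv mult 3) (some b)
    else solveLoop rest stack result mult (some b)

def solve (braces : String) : Int :=
  solveLoop braces.toList [] 0 1 none

-- ===== PORT B =====
-- B's stack entries: Sum.inl = open-bracket marker, Sum.inr = computed value (top = head).
-- popVals: the 'while stack and isinstance(stack[-1], int): s += stack.pop()' loop.
def popVals : List (Char ⊕ Int) → Int → Int × List (Char ⊕ Int)
  | Sum.inr v :: rest, s => popVals rest (s + v)
  | st, s => (s, st)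

def sumVals : List (Char ⊕ Int) → Int
  | [] => 0
  | Sum.inr v :: r => v + sumVals r
  | Sum.inl _ :: r => sumVals r

def altLoop : List Char → List (Char ⊕ Int) → Option Char → Int
  | [], stack, _ =>
    if stack.any (fun e => e.isLeft) then 0 else sumVals stack
  | ch :: rest, stack, prev =>
    if ch = '(' ∨ ch = '[' then
      altLoop rest (Sum.inl ch :: stack) (some ch)
    else if ch = ')' ∨ ch = ']' then
      let openb : Char := if ch = ')' then '(' else '['
      let base : Int := if ch = ')' then 2 else 3
      let p := popVals stack 0
      match p.2 with
      | Sum.inl t :: st' =>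
        if t = openb then
          altLoop rest (Sum.inr (if prev = some openb then base else base * p.1) :: st') (some ch)
        else 0
      | _ => 0
    else altLoop rest stack (some ch)

def solve_alt (braces : String) : Int :=
  altLoop braces.toList [] none

-- ===== PRECONDITION & SPEC =====
def Spec_solve (braces : String) (out : Int) : Prop := out = solve_alt braces
instance (braces : String) (out : Int) : Decidable (Spec_solve braces out) := by unfold Spec_solve; infer_instance

-- ===== CLAIM (what is proved, stated in full; the proofs are below) =====
def Claim_equal_solve : Prop := ∀ (braces : String), Dom_solve braces → Spec_solve braces (solve braces)

-- ===== LEMMAS AND PROOFS =====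

-- weight of an open bracket
def wOf (c : Char) : Int := if c = '(' then 2 else 3

def prodW : List Char → Int
  | [] => 1
  | c :: r => wOf c * prodW r

-- ghost value of B's stack under A's current multiplier W
def hval : List (Char ⊕ Int) → Int → Int
  | [], _ => 0
  | Sum.inr v :: r, W => W * v + hval r W
  | Sum.inl c :: r, W => hval r (PySem.Int.floordiv W (wOf c))

-- markers of B's stack, top-down
def marks : List (Char ⊕ Int) → List Char
  | [] => []
  | Sum.inl c :: r => c :: marks r
  | Sum.inr _ :: r => marks r

def StInv (stA : List Char) (result mult : Int) (prev : Option Char)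
    (stB : List (Char ⊕ Int)) : Prop :=
  marks stB = stA ∧ mult = prodW stA ∧ result = hval stB mult ∧
  (∀ c, prev = some c → (c = '(' ∨ c = '[') → stB.head? = some (Sum.inl c))

lemma floordiv_mul_cancel (k p : Int) (hk : 0 < k) :
    PySem.Int.floordiv (k * p) k = p := by
  rw [PySem.Int.floordiv_eq_ediv_of_pos hk]
  exact Int.mul_ediv_cancel_left p (by omega)

lemma popVals_spec (W : Int) : ∀ (stB : List (Char ⊕ Int)) (s : Int),
    marks (popVals stB s).2 = marks stB ∧
    hval stB W = W * ((popVals stB s).1 - s) + hval (popVals stB s).2 W ∧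
    ((popVals stB s).2 = [] ∨ ∃ c r, (popVals stB s).2 = Sum.inl c :: r) := by
  intro stB
  induction stB with
  | nil => intro s; refine ⟨rfl, by simp [popVals, hval], Or.inl rfl⟩
  | cons e r ih =>
    intro s
    match e with
    | Sum.inl c => exact ⟨rfl, by simp [popVals, hval], Or.inr ⟨c, r, rfl⟩⟩
    | Sum.inr v =>
      have h := ih (s + v)
      refine ⟨by simpa [popVals, marks] using h.1, ?_, by simpa [popVals] using h.2.2⟩
      have h2 := h.2.1
      simp only [popVals, hval]
      rw [h2]; ring

lemma popVals_marker (stB : List (Char ⊕ Int)) (s : Int) (c : Char) (r : List (Char ⊕ Int))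
    (h : stB = Sum.inl c :: r) : popVals stB s = (s, stB) := by
  subst h; rfl

lemma sumVals_eq_hval_one (stB : List (Char ⊕ Int)) (h : marks stB = []) :
    hval stB 1 = sumVals stB := by
  induction stB with
  | nil => rfl
  | cons e r ih =>
    match e with
    | Sum.inl c => simp [marks] at h
    | Sum.inr v =>
      simp only [marks] at h
      simp [hval, sumVals, ih h]

lemma marks_nil_iff (stB : List (Char ⊕ Int)) :
    marks stB = [] ↔ stB.any (fun e => e.isLeft) = false := by
  induction stB with
  | nil => simp [marks]
  | cons e r ih =>
    match e with
    | Sum.inl c => simp [marks]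
    | Sum.inr v => simpa [marks] using ih

lemma loop_eq : ∀ (cs : List Char) (stA : List Char) (result mult : Int)
    (prev : Option Char) (stB : List (Char ⊕ Int)),
    StInv stA result mult prev stB →
    solveLoop cs stA result mult prev = altLoop cs stB prev := by
  intro cs
  induction cs with
  | nil =>
    intro stA result mult prev stB ⟨hm, hw, hr, _⟩
    simp only [solveLoop, altLoop]
    by_cases hA : stA = []
    · subst hA
      have hfalse := (marks_nil_iff stB).mp hm
      rw [if_pos rfl, if_neg (by simp [hfalse])]
      rw [hr, hw]
      exact sumVals_eq_hval_one stB hm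
    · rw [if_neg hA, if_pos]
      have hne : marks stB ≠ [] := by rw [hm]; exact hA
      rcases (Bool.eq_false_or_eq_true (stB.any (fun e => e.isLeft))) with h | h
      · exact h
      · exact absurd ((marks_nil_iff stB).mpr h) hne
  | cons b rest ih =>
    intro stA result mult prev stB hinv
    obtain ⟨hm, hw, hr, hp⟩ := hinv
    by_cases hb1 : b = '('
    · subst hb1
      simp only [solveLoop, altLoop, Char.reduceEq, reduceIte, true_or]
      apply ih
      refine ⟨by simp [marks, hm], by simp [prodW, wOf, ← hw]; ring, ?_, ?_⟩
      · show result = hval (Sum.inl '(' :: stB) (mult * 2)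
        simp only [hval]
        rw [show wOf '(' = (2:Int) from by decide,
          show mult * 2 = 2 * mult by ring, floordiv_mul_cancel 2 mult (by norm_num)]
        exact hr
      · intro c hc _; injection hc with hc; subst hc; rfl
    · by_cases hb2 : b = '['
      · subst hb2
        simp only [solveLoop, altLoop, Char.reduceEq, reduceIte, or_true]
        apply ih
        refine ⟨by simp [marks, hm], by simp [prodW, wOf, ← hw]; ring, ?_, ?_⟩
        · show result = hval (Sum.inl '[' :: stB) (mult * 3)
          simp only [hval]
          rw [show wOf '[' = (3:Int) from by decide,
            show mult * 3 = 3 * mult by ring, floordiv_mul_cancel 3 mult (by norm_num)]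
          exact hr
        · intro c hc _; injection hc with hc; subst hc; rfl
      · by_cases hb3 : b = ')'
        · subst hb3
          simp only [solveLoop, altLoop, Char.reduceEq, reduceIte, or_self, or_false]
          obtain ⟨hpm, hph, hpshape⟩ := popVals_spec mult stB 0
          match hA : stA with
          | [] =>
            have hpnil : (popVals stB 0).2 = [] := by
              rcases hpshape with h | ⟨c, r, h⟩
              · exact h
              · exfalso
                have := hpm
                rw [h, hm] at this
                simp [marks] at this
            rw [hpnil]
          | t :: s' =>
            obtain ⟨c, r, hcr⟩ : ∃ c r, (popVals stB 0).2 = Sum.inl c :: r := by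
              rcases hpshape with h | h
              · exfalso
                have := hpm
                rw [h, hm] at this
                simp [marks] at this
              · exact h
            have hct : c = t ∧ marks r = s' := by
              have := hpm
              rw [hcr, hm] at this
              simp [marks] at this
              exact this
            obtain ⟨hct1, hmr⟩ := hct
            subst hct1
            rw [hcr]
            by_cases ht : c = '('
            · subst ht
              show (if ¬('(':Char) = '(' then (0:Int)
                  else solveLoop rest s' (if prev = some '(' then result + mult else result)
                    (PySem.Int.floordiv mult 2) (some ')')) =
                (if ('(':Char) = '(' then
                  altLoop rest
                    (Sum.inr (if prev = some '(' then 2 else 2 * (popVals stB 0).1) :: r)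
                    (some ')')
                else 0)
              rw [if_neg (by simp), if_pos rfl]
              have hwmult : mult = 2 * prodW s' := by
                rw [hw]; simp [prodW, wOf]
              have hW' : PySem.Int.floordiv mult 2 = prodW s' := by
                rw [hwmult]; exact floordiv_mul_cancel 2 _ (by norm_num)
              apply ih
              refine ⟨by simpa [marks] using hmr, hW', ?_, ?_⟩
              · show (if prev = some '(' then result + mult else result) =
                  hval (Sum.inr (if prev = some '(' then 2 else 2 * (popVals stB 0).1) :: r)
                    (PySem.Int.floordiv mult 2)
                by_cases hpr : prev = some '('
                · rw [if_pos hpr, if_pos hpr]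
                  have hhead := hp '(' hpr (Or.inl rfl)
                  obtain ⟨tail, hBeq⟩ : ∃ tail, stB = Sum.inl '(' :: tail := by
                    cases stB with
                    | nil => simp at hhead
                    | cons e tl => simp at hhead; exact ⟨tl, by rw [hhead]⟩
                  have hpv := popVals_marker stB 0 '(' tail hBeq
                  have hr2 : r = tail := by
                    rw [hpv] at hcr; rw [hBeq] at hcr
                    injection hcr with h1 h2
                    exact h2.symm
                  have hrr : result = hval r (PySem.Int.floordiv mult 2) := by
                    rw [hr, hBeq, hr2]
                    simp only [hval]
                    rw [show wOf '(' = (2:Int) from by decide]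
                  rw [hrr, hval, hW', hwmult]; ring
                · rw [if_neg hpr, if_neg hpr]
                  have hres : result = mult * (popVals stB 0).1 + hval (Sum.inl '(' :: r) mult := by
                    rw [hr, hph, hcr]; ring_nf
                  rw [hres]
                  simp only [hval]
                  rw [show wOf '(' = (2:Int) from by decide, hW', hwmult]
                  ring
              · intro c hc hco; injection hc with hc; subst hc
                exact absurd hco (by decide)
            · show (if ¬c = '(' then (0:Int)
                  else solveLoop rest s' (if prev = some '(' then result + mult else result)
                    (PySem.Int.floordiv mult 2) (some ')')) =
                (if c = '(' then
                  altLoop rest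
                    (Sum.inr (if prev = some '(' then 2 else 2 * (popVals stB 0).1) :: r)
                    (some ')')
                else 0)
              rw [if_pos ht, if_neg ht]
        · by_cases hb4 : b = ']'
          · subst hb4
            simp only [solveLoop, altLoop, Char.reduceEq, reduceIte, or_self, or_true]
            obtain ⟨hpm, hph, hpshape⟩ := popVals_spec mult stB 0
            match hA : stA with
            | [] =>
              have hpnil : (popVals stB 0).2 = [] := by
                rcases hpshape with h | ⟨c, r, h⟩
                · exact h
                · exfalso
                  have := hpm
                  rw [h, hm] at this
                  simp [marks] at this
              rw [hpnil]
            | t :: s' =>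
              obtain ⟨c, r, hcr⟩ : ∃ c r, (popVals stB 0).2 = Sum.inl c :: r := by
                rcases hpshape with h | h
                · exfalso
                  have := hpm
                  rw [h, hm] at this
                  simp [marks] at this
                · exact h
              have hct : c = t ∧ marks r = s' := by
                have := hpm
                rw [hcr, hm] at this
                simp [marks] at this
                exact this
              obtain ⟨hct1, hmr⟩ := hct
              subst hct1
              rw [hcr]
              by_cases ht : c = '['
              · subst ht
                show (if ¬('[':Char) = '[' then (0:Int)
                    else solveLoop rest s' (if prev = some '[' then result + mult else result)
                      (PySem.Int.floordiv mult 3) (some ']')) =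
                  (if ('[':Char) = '[' then
                    altLoop rest
                      (Sum.inr (if prev = some '[' then 3 else 3 * (popVals stB 0).1) :: r)
                      (some ']')
                  else 0)
                rw [if_neg (by simp), if_pos rfl]
                have hwmult : mult = 3 * prodW s' := by
                  rw [hw]; simp [prodW, wOf]
                have hW' : PySem.Int.floordiv mult 3 = prodW s' := by
                  rw [hwmult]; exact floordiv_mul_cancel 3 _ (by norm_num)
                apply ih
                refine ⟨by simpa [marks] using hmr, hW', ?_, ?_⟩
                · show (if prev = some '[' then result + mult else result) =
                    hval (Sum.inr (if prev = some '[' then 3 else 3 * (popVals stB 0).1) :: r)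
                      (PySem.Int.floordiv mult 3)
                  by_cases hpr : prev = some '['
                  · rw [if_pos hpr, if_pos hpr]
                    have hhead := hp '[' hpr (Or.inr rfl)
                    obtain ⟨tail, hBeq⟩ : ∃ tail, stB = Sum.inl '[' :: tail := by
                      cases stB with
                      | nil => simp at hhead
                      | cons e tl => simp at hhead; exact ⟨tl, by rw [hhead]⟩
                    have hpv := popVals_marker stB 0 '[' tail hBeq
                    have hr2 : r = tail := by
                      rw [hpv] at hcr; rw [hBeq] at hcr
                      injection hcr with h1 h2
                      exact h2.symm
                    have hrr : result = hval r (PySem.Int.floordiv mult 3) := by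
                      rw [hr, hBeq, hr2]
                      simp only [hval]
                      rw [show wOf '[' = (3:Int) from by decide]
                    rw [hrr, hval, hW', hwmult]; ring
                  · rw [if_neg hpr, if_neg hpr]
                    have hres : result = mult * (popVals stB 0).1 + hval (Sum.inl '[' :: r) mult := by
                      rw [hr, hph, hcr]; ring_nf
                    rw [hres]
                    simp only [hval]
                    rw [show wOf '[' = (3:Int) from by decide, hW', hwmult]
                    ring
                · intro c hc hco; injection hc with hc; subst hc
                  exact absurd hco (by decide)
              · show (if ¬c = '[' then (0:Int)
                    else solveLoop rest s' (if prev = some '[' then result + mult else result)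
                      (PySem.Int.floordiv mult 3) (some ']')) =
                  (if c = '[' then
                    altLoop rest
                      (Sum.inr (if prev = some '[' then 3 else 3 * (popVals stB 0).1) :: r)
                      (some ']')
                  else 0)
                rw [if_pos ht, if_neg ht]
          · have hno : ¬(b = '(' ∨ b = '[') := by tauto
            have hnc : ¬(b = ')' ∨ b = ']') := by tauto
            simp only [solveLoop, altLoop, if_neg hb1, if_neg hb2, if_neg hb3, if_neg hb4,
              if_neg hno, if_neg hnc]
            apply ih
            refine ⟨hm, hw, hr, ?_⟩
            intro c hc hco; injection hc with hc; subst hc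
            exact absurd hco (by tauto)

-- ===== VERDICT (by name: the statement is the Claim_ definition above) =====
theorem solve_spec : Claim_equal_solve := by
  intro braces _
  unfold Spec_solve solve solve_alt
  exact loop_eq braces.toList [] 0 1 none [] ⟨rfl, rfl, rfl, fun c h _ => by cases h⟩
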